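-- pv_equiv track=rewrite | github.com/constatza/dlkit | src/dlkit/interfaces/servers/domain_functions.py | remove_server_from_tracking
-- ===== SOURCE A (Python) =====
-- def get_host_variants(host: str, port: int) -> list[str]:
--     """Pure function to get all equivalent host:port combinations.
--
--     Args:
--         host: Server hostname
--         port: Server port
--
--     Returns:
--         List of equivalent host:port strings
--     """
--     variants = [f"{host}:{port}"]
--
--     # Add localhost variants for local addresses
--     if host == "localhost":
--         variants.append(f"127.0.0.1:{port}")
--     elif host == "127.0.0.1":
--         variants.append(f"localhost:{port}")
--     elif host not in ("127.0.0.1", "localhost"):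
--         variants.extend([f"127.0.0.1:{port}", f"localhost:{port}"])
--
--     # Remove duplicates while preserving order
--     return list(dict.fromkeys(variants))
--
-- def remove_server_from_tracking(
--     servers: dict[str, list[int]], host: str, port: int
-- ) -> dict[str, list[int]]:
--     """Pure function to remove server from tracking
--
--     Args:
--         servers: Current tracking dataflow
--         host: Server hostname
--         port: Server port
--
--     Returns:
--         Updated tracking dataflow
--     """
--     servers_copy = servers.copy()
--     server_keys_to_remove = get_host_variants(host, port)
--
--     for key in server_keys_to_remove:
--         servers_copy.pop(key, None)
--
--     return servers_copy
-- ===== SOURCE B (Python) =====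
-- def remove_server_from_tracking(
--     servers: dict[str, list[int]], host: str, port: int
-- ) -> dict[str, list[int]]:
--     """Remove server from tracking.
--
--     In every branch of A's get_host_variants the variant set is exactly
--     {f"{host}:{port}", f"127.0.0.1:{port}", f"localhost:{port}"} (for the
--     local hosts the first coincides with one of the fixed two), so B just
--     filters the tracked servers once against those three candidate keys.
--     """
--     doomed = (f"{host}:{port}", f"127.0.0.1:{port}", f"localhost:{port}")
--     return {k: v for k, v in servers.items() if k not in doomed}
-- ===== Notes on version B (the rewrite author's own statement) =====
-- stated objective: simpler
-- what changed: B drops the get_host_variants helper and the copy-then-pop loop entirely: it observes that the variant set always equals {host:port, 127.0.0.1:port, localhost:port} and filters the tracked servers once against those three keys.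
import Mathlib
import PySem

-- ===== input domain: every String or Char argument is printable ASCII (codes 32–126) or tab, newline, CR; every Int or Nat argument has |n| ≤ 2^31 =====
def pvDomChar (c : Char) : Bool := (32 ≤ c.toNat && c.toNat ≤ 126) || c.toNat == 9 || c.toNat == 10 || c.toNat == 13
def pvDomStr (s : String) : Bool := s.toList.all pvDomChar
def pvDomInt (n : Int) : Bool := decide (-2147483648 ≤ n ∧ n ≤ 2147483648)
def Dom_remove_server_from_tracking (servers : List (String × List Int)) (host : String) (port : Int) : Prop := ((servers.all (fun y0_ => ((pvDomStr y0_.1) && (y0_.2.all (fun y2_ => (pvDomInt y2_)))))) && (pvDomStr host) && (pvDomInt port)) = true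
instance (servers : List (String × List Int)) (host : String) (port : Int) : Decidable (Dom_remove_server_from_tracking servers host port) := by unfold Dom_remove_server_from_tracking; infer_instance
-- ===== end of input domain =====

-- B drops A's get_host_variants helper and copy-then-pop loop: the variant set always
-- equals {host:port, 127.0.0.1:port, localhost:port}, so B filters once against those
-- three keys (objective: simpler).


-- ===== PORT A =====
-- same-module helper used by A: f"{h}:{p}"
def get_host_variants (host : String) (port : Int) : List String :=
  let variants := [host ++ ":" ++ PySem.Int.toStr port]
  let variants :=
    if host == "localhost" then variants ++ ["127.0.0.1:" ++ PySem.Int.toStr port]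
    else if host == "127.0.0.1" then variants ++ ["localhost:" ++ PySem.Int.toStr port]
    else if !(host == "127.0.0.1" || host == "localhost") then
      variants ++ ["127.0.0.1:" ++ PySem.Int.toStr port, "localhost:" ++ PySem.Int.toStr port]
    else variants
  PySem.List.dedup variants

def remove_server_from_tracking (servers : List (String × List Int)) (host : String) (port : Int) : List (String × List Int) :=
  let servers_copy := PySem.Dict.mk servers
  let server_keys_to_remove := get_host_variants host port
  -- d.pop(key, None): remove key if present, discard the value
  (server_keys_to_remove.foldl (fun d key => PySem.Dict.erase d key) servers_copy).items

-- ===== PORT B =====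
def remove_server_from_tracking_alt (servers : List (String × List Int)) (host : String) (port : Int) : List (String × List Int) :=
  let doomed := (host ++ ":" ++ PySem.Int.toStr port,
                 "127.0.0.1:" ++ PySem.Int.toStr port,
                 "localhost:" ++ PySem.Int.toStr port)
  servers.filter (fun p => !(p.1 == doomed.1 || p.1 == doomed.2.1 || p.1 == doomed.2.2))

-- ===== PRECONDITION & SPEC =====
def Spec_remove_server_from_tracking (servers : List (String × List Int)) (host : String) (port : Int) (out : List (String × List Int)) : Prop := out = remove_server_from_tracking_alt servers host port
instance (servers : List (String × List Int)) (host : String) (port : Int) (out : List (String × List Int)) : Decidable (Spec_remove_server_from_tracking servers host port out) := by unfold Spec_remove_server_from_tracking; infer_instance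

-- ===== CLAIM (what is proved, stated in full; the proofs are below) =====
def Claim_equal_remove_server_from_tracking : Prop := ∀ (servers : List (String × List Int)) (host : String) (port : Int), Dom_remove_server_from_tracking servers host port → Spec_remove_server_from_tracking servers host port (remove_server_from_tracking servers host port)

-- ===== LEMMAS AND PROOFS =====

-- A's erase loop over the variant keys, started from the dict of `l`, keeps
-- exactly the entries whose key is in none of the variants.
theorem foldl_erase_items (vs : List String) (l : List (String × List Int)) :
    (vs.foldl (fun d key => PySem.Dict.erase d key) (PySem.Dict.mk l)).items
      = l.filter (fun p => !(vs.contains p.1)) := by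
  induction vs generalizing l with
  | nil => simp
  | cons k vs ih =>
    have h : (PySem.Dict.erase (PySem.Dict.mk l) k) = PySem.Dict.mk (l.filter (fun p => !(p.1 == k))) := rfl
    simp only [List.foldl_cons, h, ih, List.filter_filter]
    apply List.filter_congr
    intro p _
    by_cases hk : p.1 = k <;> simp [hk]

-- membership in A's variant list coincides with B's three candidate keys
theorem variants_mem (host : String) (port : Int) (x : String) :
    (get_host_variants host port).contains x = true
      ↔ (x = host ++ ":" ++ PySem.Int.toStr port
        ∨ x = "127.0.0.1:" ++ PySem.Int.toStr port
        ∨ x = "localhost:" ++ PySem.Int.toStr port) := by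
  by_cases h1 : host = "localhost"
  · subst h1
    simp [get_host_variants]
    tauto
  · by_cases h2 : host = "127.0.0.1"
    · subst h2
      simp [get_host_variants]
    · simp [get_host_variants, h1, h2]

-- ===== VERDICT (by name: the statement is the Claim_ definition above) =====
theorem remove_server_from_tracking_spec : Claim_equal_remove_server_from_tracking := by
  intro servers host port _
  unfold Spec_remove_server_from_tracking remove_server_from_tracking remove_server_from_tracking_alt
  simp only [foldl_erase_items]
  apply List.filter_congr
  intro p _
  by_cases hc : (get_host_variants host port).contains p.1 = true
  · rw [hc]
    rcases (variants_mem host port p.1).mp hc with h | h | h <;> simp [h]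
  · rw [Bool.not_eq_true] at hc
    rw [hc]
    have hd : ¬(p.1 = host ++ ":" ++ PySem.Int.toStr port
        ∨ p.1 = "127.0.0.1:" ++ PySem.Int.toStr port
        ∨ p.1 = "localhost:" ++ PySem.Int.toStr port) := fun h => by
      rw [(variants_mem host port p.1).mpr h] at hc; simp at hc
    push Not at hd
    simp [hd.1, hd.2.1, hd.2.2]
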